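-- pv_equiv track=rewrite | github.com/ebtesamaloubid/Eng2LeetConverter | Eng2LeetConverter.py | homoglyphs
-- ===== SOURCE A (Python) =====
-- def homoglyphs(string):
--
--     a = ("C","A","I","H") # letters from the user
--     b = ("<","@","][","#") # homoglyphs
-- # for loop replaces  letters with homoglyphs
--     for i in range(len(string)):
--         for j in range(len(a)):
--             # if the user ented the letter
--             if string[i] == a[j]:
--                 string = string[:i] + b[j] + string[i+1:]
--                 break
--
-- # returing the homoglyphs
--     return string
-- ===== SOURCE B (Python) =====
-- _LEET = str.maketrans({"C": "<", "A": "@", "I": "][", "H": "#"})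
--
--
-- def homoglyphs(string):
--     return string.translate(_LEET)
-- ===== Notes on version B (the rewrite author's own statement) =====
-- stated objective: idiomatic
-- what changed: A rebuilds the whole string by slicing at every matched index inside a fixed-length index loop; B replaces every letter in one pass with str.translate and a translation table.
-- intended difference: On strings where some letter of C/A/I/H is preceded by more 'I's than there are characters after it, A's fixed range(len(string)) scan runs out before reaching that letter (each two-character 'I' expansion shifts the scan) and A returns it unconverted, while B converts every occurrence, which is the function's evident intent. — e.g. on homoglyphs("II"): A returns "][I", B returns "][]["
import Mathlib
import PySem

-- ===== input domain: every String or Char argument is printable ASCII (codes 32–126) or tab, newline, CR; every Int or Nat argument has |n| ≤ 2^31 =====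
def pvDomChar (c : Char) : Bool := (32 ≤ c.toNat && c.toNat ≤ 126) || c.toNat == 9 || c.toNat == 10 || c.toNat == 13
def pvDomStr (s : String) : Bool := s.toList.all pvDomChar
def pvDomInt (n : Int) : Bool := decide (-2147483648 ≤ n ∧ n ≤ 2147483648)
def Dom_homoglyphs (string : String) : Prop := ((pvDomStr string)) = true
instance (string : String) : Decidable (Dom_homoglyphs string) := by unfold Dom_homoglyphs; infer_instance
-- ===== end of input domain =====

-- B replaces A's index loop with repeated whole-string slicing by one translation-table pass (str.translate); A's fixed-length scan misses letters after enough 'I' expansions, stated as D_.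


-- ===== PORT A =====
-- the paired tuples a (letters) and b (homoglyphs) of A, zipped
def pvPairsA : List (Char × List Char) := [('C', ['<']), ('A', ['@']), ('I', [']', '[']), ('H', ['#'])]

-- inner 'for j in range(len(a))' with its break: try each (a[j], b[j]) in order;
-- string[i] is read via pyGet? (i is always in range here: i < the initial length ≤ the
-- current length, so the none branch — Python's IndexError — is unreachable; it returns s).
def pvInnerA (s : List Char) (i : Int) : List (Char × List Char) → List Char
  | [] => s
  | (aj, bj) :: rest =>
    if PySem.List.pyGet? s i == some aj then
      PySem.List.slice s none (some i) ++ bj ++ PySem.List.slice s (some (i + 1)) none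
    else pvInnerA s i rest

-- outer 'for i in range(len(string))': len(string) is evaluated once, string rebinds each hit
def homoglyphs (string : String) : String :=
  let s := string.toList
  String.ofList ((PySem.List.pyRange 0 (s.length : Int) 1).foldl (fun t i => pvInnerA t i pvPairsA) s)

-- ===== PORT B =====
-- the translation table Source B builds with str.maketrans
def pvTableB : PySem.Dict Char (List Char) :=
  PySem.Dict.ofList [('C', ['<']), ('A', ['@']), ('I', [']', '[']), ('H', ['#'])]

-- str.translate ported by hand (no PySem primitive): each character becomes its table
-- entry, or itself when absent — exact for this table (plain char keys, string values)
def pvRep (c : Char) : List Char := (PySem.Dict.get? pvTableB c).getD [c]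

def homoglyphs_alt (string : String) : String :=
  String.ofList (string.toList.flatMap pvRep)

-- ===== PRECONDITION & SPEC =====
-- On strings where some letter of C/A/I/H is preceded by more 'I's than there are characters
-- after it, A's fixed range(len(string)) scan runs out before reaching that letter (each
-- two-character 'I' expansion shifts the scan by one) and A returns it unconverted; B converts every
-- occurrence, which is the function's evident intent.
def pvConv (c : Char) : Bool := c == 'C' || c == 'A' || c == 'I' || c == 'H'

def pvTrunc : List Char → Nat → Bool
  | [], _ => false
  | c :: rest, k =>
    (pvConv c && decide (rest.length < k)) ||
      pvTrunc rest (if c == 'I' then k + 1 else k)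

def D_homoglyphs (string : String) : Prop := pvTrunc string.toList 0 = true
instance (string : String) : Decidable (D_homoglyphs string) := by unfold D_homoglyphs; infer_instance

def Spec_homoglyphs (string : String) (out : String) : Prop := ¬ D_homoglyphs string → out = homoglyphs_alt string
instance (string : String) (out : String) : Decidable (Spec_homoglyphs string out) := by unfold Spec_homoglyphs; infer_instance

def pvDiffWitness_homoglyphs : String := "II"
def pvDiffWitnessOut_homoglyphs : String × String := ("][I", "][][")

-- ===== CLAIM (what is proved, stated in full; the proofs are below) =====
def Claim_unchanged_homoglyphs : Prop := ∀ (string : String), Dom_homoglyphs string → Spec_homoglyphs string (homoglyphs string)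
def Claim_changed_homoglyphs : Prop := Dom_homoglyphs (pvDiffWitness_homoglyphs) ∧ D_homoglyphs (pvDiffWitness_homoglyphs) ∧ homoglyphs (pvDiffWitness_homoglyphs) = pvDiffWitnessOut_homoglyphs.1 ∧ homoglyphs_alt (pvDiffWitness_homoglyphs) = pvDiffWitnessOut_homoglyphs.2 ∧ pvDiffWitnessOut_homoglyphs.1 ≠ pvDiffWitnessOut_homoglyphs.2
def Claim_exact_homoglyphs : Prop := ∀ (string : String), Dom_homoglyphs string → D_homoglyphs string → homoglyphs string ≠ homoglyphs_alt string

-- ===== LEMMAS AND PROOFS =====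

-- proof-side model of A's scan: a budget of remaining indices; each scanned character
-- costs as many indices as its replacement is long
def pvLoopB : List Char → Int → List Char
  | [], _ => []
  | c :: rest, budget =>
    if budget ≤ 0 then c :: rest
    else
      match PySem.Dict.get? pvTableB c with
      | none => c :: pvLoopB rest (budget - 1)
      | some r => r ++ pvLoopB rest (budget - r.length)

theorem pvGetTable_none (c : Char) (h1 : c ≠ 'C') (h2 : c ≠ 'A') (h3 : c ≠ 'I') (h4 : c ≠ 'H') :
    PySem.Dict.get? pvTableB c = none := by
  rw [PySem.Dict.get?_eq_none_iff_not_mem_keys]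
  rw [show pvTableB.keys = ['C', 'A', 'I', 'H'] by decide]
  simp [h1, h2, h3, h4]

theorem pvRep_of_notkey (c : Char) (h1 : c ≠ 'C') (h2 : c ≠ 'A') (h3 : c ≠ 'I') (h4 : c ≠ 'H') :
    pvRep c = [c] := by
  simp [pvRep, pvGetTable_none c h1 h2 h3 h4]

theorem pvRep_len_one (c : Char) (h3 : c ≠ 'I') : (pvRep c).length = 1 := by
  by_cases h1 : c = 'C'; · subst h1; decide
  by_cases h2 : c = 'A'; · subst h2; decide
  by_cases h4 : c = 'H'; · subst h4; decide
  simp [pvRep_of_notkey c h1 h2 h3 h4]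

theorem pvLoopB_nonpos (T : List Char) (b : Int) (hb : b ≤ 0) : pvLoopB T b = T := by
  cases T with
  | nil => rfl
  | cons c rest => simp [pvLoopB, hb]

theorem pvLoopB_cons (c : Char) (rest : List Char) (b : Int) (hb : ¬ b ≤ 0) :
    pvLoopB (c :: rest) b = pvRep c ++ pvLoopB rest (b - (pvRep c).length) := by
  cases h : PySem.Dict.get? pvTableB c with
  | none => simp [pvLoopB, hb, pvRep, h]
  | some r => simp [pvLoopB, hb, pvRep, h]

-- indices at or past the end of s leave s unchanged (Python never reaches them)
theorem pvInnerA_past (s : List Char) (i : Int) (h : (s.length : Int) ≤ i)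
    (ps : List (Char × List Char)) : pvInnerA s i ps = s := by
  induction ps with
  | nil => rfl
  | cons p rest ih =>
    obtain ⟨aj, bj⟩ := p
    have hn : PySem.List.pyGet? s i = none := by
      rw [PySem.List.pyGet?_eq_none_iff]
      simp [PySem.Raise.InRange]
      omega
    simp [pvInnerA, hn, ih]

theorem pvFoldl_past (P : List Char) (lo hi : Int) (h : (P.length : Int) ≤ lo) :
    (PySem.List.pyRange lo hi 1).foldl (fun t i => pvInnerA t i pvPairsA) P = P := by
  by_cases hlt : lo < hi
  · rw [PySem.List.pyRange_one_cons hlt, List.foldl_cons,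
        pvInnerA_past P lo h, pvFoldl_past P (lo + 1) hi (by omega)]
  · rw [PySem.List.pyRange_one_eq_nil (by omega), List.foldl_nil]
termination_by (hi - lo).toNat
decreasing_by omega

-- scanning the aligned state P ++ c :: rest at index |P| replaces c by pvRep c
theorem pvInnerA_aligned (P rest : List Char) (c : Char) :
    pvInnerA (P ++ c :: rest) (P.length : Int) pvPairsA = P ++ pvRep c ++ rest := by
  have hget : PySem.List.pyGet? (P ++ c :: rest) (P.length : Int) = some c :=
    PySem.List.pyGet?_append_length P rest c
  have hto : PySem.List.slice (P ++ c :: rest) none (some (P.length : Int)) = P := by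
    rw [PySem.List.slice_to_natCast]; simp
  have hfrom : PySem.List.slice (P ++ c :: rest) (some ((P.length : Int) + 1)) none = rest := by
    rw [show ((P.length : Int) + 1) = ((P.length + 1 : Nat) : Int) by push_cast; ring,
        PySem.List.slice_from_natCast]
    rw [show P.length + 1 = P.length + 1 from rfl]
    simp [List.drop_append]
  by_cases h1 : c = 'C'
  · subst h1; simp [pvInnerA, pvPairsA, hto, hfrom, pvRep,
      show PySem.Dict.get? pvTableB 'C' = some ['<'] by decide]
  by_cases h2 : c = 'A'
  · subst h2; simp [pvInnerA, pvPairsA, hto, hfrom, pvRep,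
      show PySem.Dict.get? pvTableB 'A' = some ['@'] by decide]
  by_cases h3 : c = 'I'
  · subst h3; simp [pvInnerA, pvPairsA, hto, hfrom, pvRep,
      show PySem.Dict.get? pvTableB 'I' = some [']', '['] by decide]
  by_cases h4 : c = 'H'
  · subst h4; simp [pvInnerA, pvPairsA, hto, hfrom, pvRep,
      show PySem.Dict.get? pvTableB 'H' = some ['#'] by decide]
  · simp [pvInnerA, pvPairsA, h1, h2, h3, h4, pvRep_of_notkey c h1 h2 h3 h4]

-- the invariant: A's scan from index |P| with m indices left = the budget pass on the tail
theorem pvMain (T : List Char) : ∀ (P : List Char) (m : Nat),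
    (PySem.List.pyRange (P.length : Int) ((P.length : Int) + (m : Int)) 1).foldl
        (fun t i => pvInnerA t i pvPairsA) (P ++ T)
      = P ++ pvLoopB T (m : Int) := by
  induction T with
  | nil =>
    intro P m
    simp only [List.append_nil, pvLoopB]
    exact pvFoldl_past P _ _ (le_refl _)
  | cons c rest ih =>
    intro P m
    cases m with
    | zero =>
      simp only [Nat.cast_zero, add_zero]
      rw [PySem.List.pyRange_one_eq_nil (le_refl _), List.foldl_nil,
          pvLoopB_nonpos (c :: rest) 0 (le_refl _)]
    | succ m' =>
      push_cast
      rw [PySem.List.pyRange_one_cons (by omega), List.foldl_cons,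
          pvInnerA_aligned, pvLoopB_cons c rest _ (by omega)]
      by_cases h3 : c = 'I'
      · subst h3
        rw [show pvRep 'I' = [']', '['] by decide]
        cases m' with
        | zero =>
          rw [PySem.List.pyRange_one_eq_nil (by omega), List.foldl_nil,
              pvLoopB_nonpos rest _ (by simp)]
          simp
        | succ m'' =>
          push_cast
          have e1 : (((P ++ [']']).length : Nat) : Int) = (P.length : Int) + 1 := by simp
          have e2 : ((((P ++ [']']) ++ ['[']).length : Nat) : Int) = (P.length : Int) + 2 := by simp
          rw [show (P ++ [']', '['] ++ rest) = ((P ++ [']']) ++ ('[' :: rest)) by simp,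
              PySem.List.pyRange_one_cons (by omega), List.foldl_cons,
              show ((P.length : Int) + 1) = (((P ++ [']']).length : Nat) : Int) by rw [e1],
              pvInnerA_aligned, show pvRep '[' = ['['] by decide]
          have h := ih ((P ++ [']']) ++ ['[']) m''
          rw [show ((((P ++ [']']).length : Nat) : Int) + 1)
                = ((((P ++ [']']) ++ ['[']).length : Nat) : Int) by rw [e1, e2]; ring,
              show ((P.length : Int) + ((m'' : Int) + 1 + 1))
                = ((((P ++ [']']) ++ ['[']).length : Nat) : Int) + (m'' : Int) by rw [e2]; ring,
              show ((P ++ [']']) ++ ['['] ++ rest) = (((P ++ [']']) ++ ['[']) ++ rest) by simp,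
              h,
              show ((m'' : Int) + 1 + 1 - ((([']', '['] : List Char)).length : Int)) = (m'' : Int) by
                simp only [List.length_cons, List.length_nil]; push_cast; ring]
          simp
      · have hlen : (pvRep c).length = 1 := pvRep_len_one c h3
        have h := ih (P ++ pvRep c) m'
        have e1 : (((P ++ pvRep c).length : Nat) : Int) = (P.length : Int) + 1 := by
          simp [hlen]
        rw [show ((P.length : Int) + ((m' : Int) + 1))
              = (((P ++ pvRep c).length : Nat) : Int) + (m' : Int) by rw [e1]; ring,
            show ((P.length : Int) + 1) = (((P ++ pvRep c).length : Nat) : Int) by rw [e1],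
            show (P ++ pvRep c ++ rest) = ((P ++ pvRep c) ++ rest) by simp,
            h,
            show ((m' : Int) + 1 - ((pvRep c).length : Int)) = (m' : Int) by
              rw [hlen]; push_cast; ring]
        simp

theorem homoglyphs_as_loop (s : String) :
    homoglyphs s = String.ofList (pvLoopB s.toList (s.toList.length : Int)) := by
  unfold homoglyphs
  simpa using congrArg String.ofList (pvMain s.toList [] s.toList.length)

theorem pvRep_of_not_conv (c : Char) (h : pvConv c = false) : pvRep c = [c] := by
  simp only [pvConv, Bool.or_eq_false_iff, beq_eq_false_iff_ne] at h
  exact pvRep_of_notkey c h.1.1.1 h.1.1.2 h.1.2 h.2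

-- UNCHANGED side: when pvTrunc never fires, A's budget never runs out and the scan is the full translation
theorem pvLoopB_eq_flatMap (T : List Char) : ∀ (k : Nat) (b : Int),
    b = (T.length : Int) - (k : Int) → pvTrunc T k = false →
    pvLoopB T b = T.flatMap pvRep := by
  induction T with
  | nil => intro k b _ _; simp [pvLoopB]
  | cons c rest ih =>
    intro k b hb ht
    simp only [pvTrunc, Bool.or_eq_false_iff, Bool.and_eq_false_iff] at ht
    obtain ⟨hhead, htail⟩ := ht
    by_cases hpos : b ≤ 0
    · -- k ≥ |c::rest|, so every character (here and below) is unconvertible and stays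
      have hk : rest.length < k := by
        simp only [List.length_cons] at hb; omega
      have hc : pvConv c = false := by
        rcases hhead with h | h
        · exact h
        · simp only [decide_eq_false_iff_not] at h; omega
      have hcI : c ≠ 'I' := by
        intro h; subst h; simp [pvConv] at hc
      rw [pvLoopB_nonpos _ _ hpos]
      rw [List.flatMap_cons, pvRep_of_not_conv c hc,
          ← ih k (b - 1) (by simp at hb ⊢; omega) (by simpa [hcI] using htail),
          pvLoopB_nonpos _ _ (by omega)]
      simp
    · rw [pvLoopB_cons c rest b hpos, List.flatMap_cons]
      congr 1
      by_cases h3 : c = 'I'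
      · subst h3
        refine ih (k + 1) _ ?_ (by simpa using htail)
        rw [show pvRep 'I' = [']', '['] by decide]
        simp at hb ⊢; omega
      · refine ih k _ ?_ (by simpa [h3] using htail)
        rw [show ((pvRep c).length : Int) = 1 by rw [pvRep_len_one c h3]; rfl]
        simp at hb ⊢; omega

-- CHANGED side helpers: the first character of a convertible letter's replacement differs from it
theorem pvRep_head_ne (c : Char) (h : pvConv c = true) : ∃ r rs, pvRep c = r :: rs ∧ r ≠ c := by
  simp only [pvConv, Bool.or_eq_true, beq_iff_eq] at h
  rcases h with ((h | h) | h) | h <;> subst h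
  · exact ⟨'<', [], by decide, by decide⟩
  · exact ⟨'@', [], by decide, by decide⟩
  · exact ⟨']', ['['], by decide, by decide⟩
  · exact ⟨'#', [], by decide, by decide⟩

-- a list containing a convertible letter is changed by the full translation
theorem pvFlatMap_ne (T : List Char) (h : ∃ c ∈ T, pvConv c = true) : T ≠ T.flatMap pvRep := by
  induction T with
  | nil => simp at h
  | cons c rest ih =>
    by_cases hc : pvConv c = true
    · obtain ⟨r, rs, hr, hne⟩ := pvRep_head_ne c hc
      rw [List.flatMap_cons, hr]
      intro he
      exact hne (List.cons_eq_cons.mp he).1.symm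
    · rw [List.flatMap_cons, pvRep_of_not_conv c (by simpa using hc)]
      intro he
      have := (List.cons_eq_cons.mp he).2
      rcases h with ⟨d, hd, hdc⟩
      rcases List.mem_cons.mp hd with hd1 | hd2
      · exact hc (hd1 ▸ hdc)
      · exact ih ⟨d, hd2, hdc⟩ this

-- once k exceeds the remaining length, a firing pvTrunc means a convertible letter remains
theorem pvTrunc_mem (T : List Char) : ∀ (k : Nat), T.length ≤ k → pvTrunc T k = true →
    ∃ c ∈ T, pvConv c = true := by
  induction T with
  | nil => intro k _ h; simp [pvTrunc] at h
  | cons c rest ih =>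
    intro k hk ht
    simp only [pvTrunc, Bool.or_eq_true, Bool.and_eq_true] at ht
    rcases ht with ⟨h1, _⟩ | h
    · exact ⟨c, List.mem_cons_self, h1⟩
    · have hk' : rest.length ≤ (if c == 'I' then k + 1 else k) := by
        simp only [List.length_cons] at hk; split <;> omega
      obtain ⟨d, hd, hdc⟩ := ih _ hk' h
      exact ⟨d, List.mem_cons_of_mem _ hd, hdc⟩

-- TIGHT side: when pvTrunc fires, the budget pass differs from the full translation
theorem pvLoopB_ne_flatMap (T : List Char) : ∀ (k : Nat) (b : Int),
    b = (T.length : Int) - (k : Int) → pvTrunc T k = true →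
    pvLoopB T b ≠ T.flatMap pvRep := by
  induction T with
  | nil => intro k b _ h; simp [pvTrunc] at h
  | cons c rest ih =>
    intro k b hb ht
    by_cases hpos : b ≤ 0
    · rw [pvLoopB_nonpos _ _ hpos]
      exact pvFlatMap_ne _ (pvTrunc_mem _ k (by simp at hb ⊢; omega) ht)
    · simp only [pvTrunc, Bool.or_eq_true, Bool.and_eq_true] at ht
      rcases ht with ⟨_, h2⟩ | h
      · exfalso
        simp only [decide_eq_true_eq] at h2
        simp only [List.length_cons] at hb
        omega
      · rw [pvLoopB_cons c rest b hpos, List.flatMap_cons]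
        intro he
        have htl := List.append_cancel_left he
        by_cases h3 : c = 'I'
        · subst h3
          refine ih (k + 1) _ ?_ (by simpa using h) htl
          rw [show pvRep 'I' = [']', '['] by decide]
          simp at hb ⊢; omega
        · refine ih k _ ?_ (by simpa [h3] using h) htl
          rw [show ((pvRep c).length : Int) = 1 by rw [pvRep_len_one c h3]; rfl]
          simp at hb ⊢; omega

-- ===== VERDICT (by name: the statements are the Claim_ definitions above) =====
theorem homoglyphs_spec : Claim_unchanged_homoglyphs := by
  intro s _ hD
  unfold homoglyphs_alt
  rw [homoglyphs_as_loop,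
      pvLoopB_eq_flatMap s.toList 0 _ (by simp) (by simpa [D_homoglyphs] using hD)]

theorem homoglyphs_changed : Claim_changed_homoglyphs := by
  unfold Claim_changed_homoglyphs; decide

theorem homoglyphs_tight : Claim_exact_homoglyphs := by
  intro s _ hD he
  have h1 := homoglyphs_as_loop s
  have h2 : pvLoopB s.toList (s.toList.length : Int) = s.toList.flatMap pvRep := by
    have := h1 ▸ he
    unfold homoglyphs_alt at this
    exact String.ofList_inj.mp this
  exact pvLoopB_ne_flatMap s.toList 0 _ (by simp) hD h2
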